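-- pv_equiv track=rewrite | github.com/Arpan-206/STUMPCompiler | stump_incl.py | build_value
-- ===== SOURCE A (Python) =====
-- from typing import Iterable, List, Sequence
--
-- def build_value(value: int, reg: str) -> List[str]:
--     if not 0 <= value <= 0xFFFF:
--         raise ValueError(f"Immediate out of range: {value}")
--     if value == 0:
--         return [f"    MOV {reg}, #0"]
--     bits = bin(value)[2:]
--     instructions = [f"    MOV {reg}, #{bits[0]}"]
--     for bit in bits[1:]:
--         instructions.append(f"    ADD {reg}, {reg}, {reg}")
--         if bit == "1":
--             instructions.append(f"    ADD {reg}, {reg}, #1")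
--     return instructions
-- ===== SOURCE B (Python) =====
-- from typing import List
--
-- def _emit(value: int, reg: str) -> List[str]:
--     # value >= 1: recurse on the halved value, then double (and maybe +1)
--     if value == 1:
--         return [f"    MOV {reg}, #1"]
--     out = _emit(value >> 1, reg)
--     out.append(f"    ADD {reg}, {reg}, {reg}")
--     if value & 1:
--         out.append(f"    ADD {reg}, {reg}, #1")
--     return out
--
-- def build_value(value: int, reg: str) -> List[str]:
--     if not 0 <= value <= 0xFFFF:
--         raise ValueError(f"Immediate out of range: {value}")
--     if value == 0:
--         return [f"    MOV {reg}, #0"]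
--     return _emit(value, reg)
-- ===== Notes on version B (the rewrite author's own statement) =====
-- stated objective: alternative
-- what changed: B replaces A's iteration over the characters of bin(value) with a direct recursion on value>>1 that emits the double/add-one sequence, never forming the binary string.
import Mathlib
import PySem

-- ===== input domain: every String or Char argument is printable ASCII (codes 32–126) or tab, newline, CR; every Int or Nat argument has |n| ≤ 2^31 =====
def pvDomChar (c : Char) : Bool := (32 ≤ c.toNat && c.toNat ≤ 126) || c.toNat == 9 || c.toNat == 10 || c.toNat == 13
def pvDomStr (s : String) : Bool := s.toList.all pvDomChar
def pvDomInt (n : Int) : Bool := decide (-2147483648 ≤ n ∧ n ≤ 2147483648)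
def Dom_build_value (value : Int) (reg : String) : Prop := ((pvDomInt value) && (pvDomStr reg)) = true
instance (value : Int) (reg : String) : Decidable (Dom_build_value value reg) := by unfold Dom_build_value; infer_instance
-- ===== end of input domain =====

-- B emits the same instruction list by recursing on value>>1 instead of iterating over bin(value)'s digits.

-- ===== PORT A =====
-- bin(n)[2:] for n ≥ 1, as a list of '0'/'1' characters (MSB first); exact for n ≥ 1
def binDigits (n : Nat) : List Char :=
  if n = 0 then []
  else binDigits (n / 2) ++ [if n % 2 = 1 then '1' else '0']
decreasing_by exact Nat.div_lt_self (Nat.pos_of_ne_zero (by assumption)) (by norm_num)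

def build_value (value : Int) (reg : String) : List String :=
  if 0 ≤ value ∧ value ≤ 65535 then
    if value = 0 then ["    MOV " ++ reg ++ ", #0"]
    else
      let bits := binDigits value.toNat
      bits.tail.foldl
        (fun acc bit =>
          let acc' := acc ++ ["    ADD " ++ reg ++ ", " ++ reg ++ ", " ++ reg]
          if bit = '1' then acc' ++ ["    ADD " ++ reg ++ ", " ++ reg ++ ", #1"] else acc')
        ["    MOV " ++ reg ++ ", #" ++ String.ofList [bits.headD '0']]
  else []   -- A raises ValueError here; excluded by Pre_build_value

-- ===== PORT B =====
-- _emit in Source B: recursion on value >> 1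
def buildEmit (n : Nat) (reg : String) : List String :=
  if n ≤ 1 then ["    MOV " ++ reg ++ ", #1"]
  else
    buildEmit (n / 2) reg
      ++ (["    ADD " ++ reg ++ ", " ++ reg ++ ", " ++ reg]
          ++ (if n % 2 = 1 then ["    ADD " ++ reg ++ ", " ++ reg ++ ", #1"] else []))
decreasing_by exact Nat.div_lt_self (by omega) (by norm_num)

def build_value_alt (value : Int) (reg : String) : List String :=
  if 0 ≤ value ∧ value ≤ 65535 then
    if value = 0 then ["    MOV " ++ reg ++ ", #0"]
    else buildEmit value.toNat reg
  else []   -- B raises ValueError here; excluded by Pre_build_value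

-- ===== PRECONDITION & SPEC =====
-- A (and B) raise ValueError exactly when value is outside 0..0xFFFF.
def Pre_build_value (value : Int) (reg : String) : Prop := 0 ≤ value ∧ value ≤ 65535
instance (value : Int) (reg : String) : Decidable (Pre_build_value value reg) := by unfold Pre_build_value; infer_instance
def pvWitness_build_value : Int × String := (13, "R1")

def Spec_build_value (value : Int) (reg : String) (out : List String) : Prop := out = build_value_alt value reg
instance (value : Int) (reg : String) (out : List String) : Decidable (Spec_build_value value reg out) := by unfold Spec_build_value; infer_instance

-- ===== CLAIM (what is proved, stated in full; the proofs are below) =====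
def Claim_equal_build_value : Prop := ∀ (value : Int) (reg : String), Dom_build_value value reg → Pre_build_value value reg → Spec_build_value value reg (build_value value reg)

-- ===== LEMMAS AND PROOFS =====

theorem binDigits_ne_nil (n : Nat) (hn : 1 ≤ n) : binDigits n ≠ [] := by
  rw [binDigits]
  simp [show ¬ n = 0 by omega]

theorem foldl_eq_buildEmit (n : Nat) (hn : 1 ≤ n) (reg : String) :
    (binDigits n).tail.foldl
        (fun acc bit =>
          let acc' := acc ++ ["    ADD " ++ reg ++ ", " ++ reg ++ ", " ++ reg]
          if bit = '1' then acc' ++ ["    ADD " ++ reg ++ ", " ++ reg ++ ", #1"] else acc')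
        ["    MOV " ++ reg ++ ", #" ++ String.ofList [(binDigits n).headD '0']]
      = buildEmit n reg := by
  induction n using Nat.strong_induction_on with
  | _ n ih =>
    by_cases h1 : n = 1
    · subst h1
      have hb : binDigits 1 = ['1'] := by rw [binDigits, binDigits]; simp
      rw [hb, buildEmit]
      simp only [List.tail_cons, List.foldl_nil, List.headD_cons]
      have h2 : (", #" ++ String.ofList ['1'] : String) = ", #1" := by decide
      rw [String.append_assoc, h2]
      simp
    · have h2 : 2 ≤ n := by omega
      have hhalf : 1 ≤ n / 2 := by omega
      have hne : binDigits (n / 2) ≠ [] := binDigits_ne_nil _ hhalf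
      have hbits : binDigits n = binDigits (n / 2) ++ [if n % 2 = 1 then '1' else '0'] := by
        rw [binDigits]; simp; omega
      have htail : (binDigits n).tail
          = (binDigits (n / 2)).tail ++ [if n % 2 = 1 then '1' else '0'] := by
        rw [hbits]
        cases hx : binDigits (n / 2) with
        | nil => exact absurd hx hne
        | cons a l => simp
      have hhead : (binDigits n).headD '0' = (binDigits (n / 2)).headD '0' := by
        rw [hbits]
        cases hx : binDigits (n / 2) with
        | nil => exact absurd hx hne
        | cons a l => simp
      rw [htail, hhead, List.foldl_append, ih (n / 2) (by omega) hhalf]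
      conv_rhs => rw [buildEmit]
      rw [if_neg (show ¬ n ≤ 1 by omega)]
      rcases Nat.mod_two_eq_zero_or_one n with hm | hm <;>
        simp [hm, List.append_assoc]

theorem build_value_spec_aux (value : Int) (reg : String)
    (hp : 0 ≤ value ∧ value ≤ 65535) :
    build_value value reg = build_value_alt value reg := by
  unfold build_value build_value_alt
  rw [if_pos hp, if_pos hp]
  by_cases h0 : value = 0
  · rw [if_pos h0, if_pos h0]
  · rw [if_neg h0, if_neg h0]
    have h1 : 1 ≤ value.toNat := by omega
    exact foldl_eq_buildEmit value.toNat h1 reg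

-- ===== VERDICT (by name: the statement is the Claim_ definition above) =====
theorem build_value_spec : Claim_equal_build_value := by
  intro value reg _ hp
  exact build_value_spec_aux value reg hp
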